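-- pv_equiv track=rewrite | github.com/Lina0107/VisuLit | import_books.py | pick_best_text_url
-- ===== SOURCE A (Python) =====
-- def pick_best_text_url(formats: dict) -> str | None:
--     """
--     Предпочитаем plain text UTF-8 (без .zip).
--     Gutendex formats keys примеры:
--     - 'text/plain; charset=utf-8'
--     - 'text/plain'
--     - 'text/plain; charset=us-ascii'
--     Также бывают html/epub и т.п.
--     """
--     if not formats:
--         return None
--
--     preferred_keys = [
--         "text/plain; charset=utf-8",
--         "text/plain; charset=us-ascii",
--         "text/plain",
--     ]
--
--     # сначала идеальные варианты
--     for k in preferred_keys: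
--         url = formats.get(k)
--         if url and isinstance(url, str) and not url.lower().endswith(".zip"):
--             return url
--
--     # иначе — любой text/plain не zip
--     for k, url in formats.items():
--         if not isinstance(url, str):
--             continue
--         if k.startswith("text/plain") and not url.lower().endswith(".zip"):
--             return url
--
--     return None
-- ===== SOURCE B (Python) =====
-- PREFERRED = ("text/plain; charset=utf-8",
--              "text/plain; charset=us-ascii",
--              "text/plain")
--
--
-- def _rank(k, url):
--     """Priority of one formats entry, or None if it never qualifies."""
--     if not isinstance(url, str) or url.lower().endswith(".zip"):
--         return None
--     if url and k in PREFERRED: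
--         return PREFERRED.index(k)
--     if k.startswith("text/plain"):
--         return 3
--     return None
--
--
-- def pick_best_text_url(formats: dict) -> str | None:
--     """Single pass: keep the url with the lowest rank, first-seen wins ties."""
--     best_rank, best_url = 4, None
--     for k, url in formats.items():
--         r = _rank(k, url)
--         if r is not None and r < best_rank:
--             best_rank, best_url = r, url
--     return best_url
-- ===== Notes on version B (the rewrite author's own statement) =====
-- stated objective: alternative
-- what changed: Replaces A's two sequential scans (three ordered dict lookups over the preferred keys, then an ordered fallback scan of items) with a single pass over formats.items() that assigns each entry a priority rank (0-2 for preferred keys with a truthy non-zip url, 3 for any other text/plain non-zip entry) and keeps the first entry of strictly lowest rank.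
import Mathlib
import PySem

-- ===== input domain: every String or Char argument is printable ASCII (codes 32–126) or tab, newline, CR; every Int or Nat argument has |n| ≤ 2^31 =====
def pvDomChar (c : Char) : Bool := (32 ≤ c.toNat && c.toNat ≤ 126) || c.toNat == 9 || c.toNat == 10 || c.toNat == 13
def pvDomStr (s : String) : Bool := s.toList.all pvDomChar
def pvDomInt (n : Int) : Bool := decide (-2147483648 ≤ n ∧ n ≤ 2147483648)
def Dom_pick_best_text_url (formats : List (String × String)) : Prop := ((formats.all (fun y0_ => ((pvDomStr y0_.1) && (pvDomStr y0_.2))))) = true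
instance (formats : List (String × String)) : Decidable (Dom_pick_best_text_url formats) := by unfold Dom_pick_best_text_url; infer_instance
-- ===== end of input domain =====

-- B replaces A's two ordered scans by one rank-and-select pass (alternative decomposition, same O(n) cost).

-- ===== PORT A =====
def pvA_preferred_keys : List String :=
  ["text/plain; charset=utf-8", "text/plain; charset=us-ascii", "text/plain"]

-- first loop of A: 'for k in preferred_keys: … return url' (early return = recursion on the key list)
def pvA_loop1 (formats : PySem.Dict String String) : List String → Option String
  | [] => none
  | k :: ks =>
    match formats.get? k with
    | some url =>
        if url ≠ "" ∧ PySem.Str.endswith (PySem.Str.lower url) ".zip" = false then some url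
        else pvA_loop1 formats ks
    | none => pvA_loop1 formats ks

-- second loop of A: 'for k, url in formats.items(): … return url'
def pvA_loop2 : List (String × String) → Option String
  | [] => none
  | (k, url) :: rest =>
      if PySem.Str.startswith k "text/plain" = true ∧ PySem.Str.endswith (PySem.Str.lower url) ".zip" = false
      then some url
      else pvA_loop2 rest

def pick_best_text_url (formats : List (String × String)) : Option String :=
  if formats.isEmpty then none
  else
    match pvA_loop1 (PySem.Dict.mk formats) pvA_preferred_keys with
    | some url => some url
    | none => pvA_loop2 formats

-- ===== PORT B =====
def pvB_preferred : List String :=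
  ["text/plain; charset=utf-8", "text/plain; charset=us-ascii", "text/plain"]

-- Source B's _rank helper
def pvB_rank (k url : String) : Option Nat :=
  if PySem.Str.endswith (PySem.Str.lower url) ".zip" = true then none
  else if url ≠ "" ∧ pvB_preferred.contains k = true then PySem.List.index? pvB_preferred k
  else if PySem.Str.startswith k "text/plain" = true then some 3
  else none

-- one iteration of Source B's loop over (best_rank, best_url)
def pvB_step (best : Nat × Option String) (kv : String × String) : Nat × Option String :=
  match pvB_rank kv.1 kv.2 with
  | none => best
  | some r => if r < best.1 then (r, some kv.2) else best

def pick_best_text_url_alt (formats : List (String × String)) : Option String :=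
  (formats.foldl pvB_step (4, none)).2

-- ===== PRECONDITION & SPEC =====
-- Pre_ excludes association lists with duplicate keys: they represent no Python dict (dict keys are
-- unique), so A's behaviour on them is an artefact of the list representation and the two ports may differ there.
def Pre_pick_best_text_url (formats : List (String × String)) : Prop := (formats.map Prod.fst).Nodup
instance (formats : List (String × String)) : Decidable (Pre_pick_best_text_url formats) := by unfold Pre_pick_best_text_url; infer_instance
def pvWitness_pick_best_text_url : (List (String × String)) := [("text/plain", "u")]

def Spec_pick_best_text_url (formats : List (String × String)) (out : Option String) : Prop := out = pick_best_text_url_alt formats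
instance (formats : List (String × String)) (out : Option String) : Decidable (Spec_pick_best_text_url formats out) := by unfold Spec_pick_best_text_url; infer_instance

-- ===== CLAIM (what is proved, stated in full; the proofs are below) =====
def Claim_equal_pick_best_text_url : Prop := ∀ (formats : List (String × String)), Dom_pick_best_text_url formats → Pre_pick_best_text_url formats → Spec_pick_best_text_url formats (pick_best_text_url formats)

-- ===== LEMMAS AND PROOFS =====

-- proof-side characterisation of B's fold: url of the first entry achieving the minimum rank below b
def pvSel (b : Nat) : List (String × String) → Option String
  | [] => none
  | p :: l =>
    match pvB_rank p.1 p.2 with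
    | none => pvSel b l
    | some r =>
        if r < b then
          match pvSel r l with
          | some v => some v
          | none => some p.2
        else pvSel b l

theorem pvSel_fold (l : List (String × String)) : ∀ (b : Nat) (u : Option String),
    (l.foldl pvB_step (b, u)).2 = match pvSel b l with | some v => some v | none => u := by
  induction l with
  | nil => intro b u; simp [pvSel]
  | cons p l ih =>
    intro b u
    cases hr : pvB_rank p.1 p.2 with
    | none => simp only [List.foldl_cons, pvSel, pvB_step, hr]; exact ih b u
    | some r =>
      by_cases hlt : r < b
      · simp only [List.foldl_cons, pvSel, pvB_step, hr, if_pos hlt]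
        rw [ih r (some p.2)]
        cases pvSel r l <;> rfl
      · simp only [List.foldl_cons, pvSel, pvB_step, hr, if_neg hlt]
        exact ih b u

theorem pvSel_none (l : List (String × String)) : ∀ (b : Nat),
    (∀ p ∈ l, ∀ r, pvB_rank p.1 p.2 = some r → b ≤ r) → pvSel b l = none := by
  induction l with
  | nil => intro b _; simp [pvSel]
  | cons p l ih =>
    intro b h
    cases hr : pvB_rank p.1 p.2 with
    | none =>
      simp only [pvSel, hr]
      exact ih b fun q hq => h q (List.mem_cons_of_mem _ hq)
    | some r =>
      have hbr : b ≤ r := h p (List.mem_cons_self ..) r hr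
      simp only [pvSel, hr, if_neg (by omega : ¬ r < b)]
      exact ih b fun q hq => h q (List.mem_cons_of_mem _ hq)

theorem pv_ne_true {e : Bool} (h : e = false) : ¬(e = true) := by simp [h]

theorem pvB_rank_le3 {k u : String} {r : Nat} (h : pvB_rank k u = some r) : r ≤ 3 := by
  unfold pvB_rank at h
  split_ifs at h
  · obtain ⟨hk, _, _⟩ := PySem.List.getElem_of_index?_eq_some h
    simp [pvB_preferred] at hk
    omega
  · injection h with h'
    omega

theorem pvB_rank_lt3 {k u : String} {r : Nat} (h : pvB_rank k u = some r) (hr : r < 3) :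
    pvB_preferred[r]? = some k ∧ u ≠ "" ∧ PySem.Str.endswith (PySem.Str.lower u) ".zip" = false := by
  unfold pvB_rank at h
  split_ifs at h with h1 h2 h3
  · obtain ⟨hk, hget, _⟩ := PySem.List.getElem_of_index?_eq_some h
    refine ⟨?_, h2.1, by simpa using h1⟩
    rw [List.getElem?_eq_getElem hk, hget]
  · injection h with h'
    omega

theorem pvB_rank_eq3 {k u : String} (h : pvB_rank k u = some 3) :
    PySem.Str.startswith k "text/plain" = true ∧ PySem.Str.endswith (PySem.Str.lower u) ".zip" = false := by
  unfold pvB_rank at h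
  split_ifs at h with h1 h2 h3
  · obtain ⟨hk, _, hbefore⟩ := PySem.List.getElem_of_index?_eq_some h
    simp [pvB_preferred] at hk
  · exact ⟨h3, by simpa using h1⟩

theorem pvB_rank_isSome {k u : String}
    (hsw : PySem.Str.startswith k "text/plain" = true)
    (hz : PySem.Str.endswith (PySem.Str.lower u) ".zip" = false) :
    ∃ r, pvB_rank k u = some r := by
  unfold pvB_rank
  rw [if_neg (pv_ne_true hz)]
  by_cases hc : u ≠ "" ∧ pvB_preferred.contains k = true
  · rw [if_pos hc]
    have : k ∈ pvB_preferred := by simpa using hc.2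
    have := PySem.List.index?_isSome_iff (xs := pvB_preferred) (v := k) |>.2 this
    exact ⟨_, Option.eq_some_of_isSome this⟩
  · rw [if_neg hc, if_pos hsw]
    exact ⟨3, rfl⟩

-- case 1 (no entry of rank < 3): B's selection is exactly A's fallback scan
theorem pvSel_case1 (l : List (String × String))
    (h : ∀ p ∈ l, ∀ r, pvB_rank p.1 p.2 = some r → 3 ≤ r) :
    pvSel 4 l = pvA_loop2 l := by
  induction l with
  | nil => simp [pvSel, pvA_loop2]
  | cons p l ih =>
    obtain ⟨k, u⟩ := p
    have htail : ∀ q ∈ l, ∀ r, pvB_rank q.1 q.2 = some r → 3 ≤ r :=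
      fun q hq => h q (List.mem_cons_of_mem _ hq)
    cases hr : pvB_rank k u with
    | none =>
      simp only [pvSel, pvA_loop2, hr]
      rw [if_neg ?_]
      · exact ih htail
      · rintro ⟨hsw, hz⟩
        obtain ⟨r, hr'⟩ := pvB_rank_isSome hsw hz
        rw [hr] at hr'; exact absurd hr' (by simp)
    | some r =>
      have h3 : 3 ≤ r := h (k, u) (List.mem_cons_self ..) r hr
      have h3' : r = 3 := le_antisymm (pvB_rank_le3 hr) h3
      subst h3'
      obtain ⟨hsw, hz⟩ := pvB_rank_eq3 hr
      have h30 : pvSel 3 l = none := pvSel_none l 3 fun q hq r' hr' => htail q hq r' hr'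
      simp only [pvSel, pvA_loop2, hr]
      rw [if_pos (show (3:Nat) < 4 by omega), h30, if_pos ⟨hsw, hz⟩]

theorem pvA_loop1_skip (d : PySem.Dict String String) (k : String) (ks : List String)
    (h : ∀ url, d.get? k = some url → ¬(url ≠ "" ∧ PySem.Str.endswith (PySem.Str.lower url) ".zip" = false)) :
    pvA_loop1 d (k :: ks) = pvA_loop1 d ks := by
  cases hg : d.get? k with
  | none => simp only [pvA_loop1, hg]
  | some url =>
    simp only [pvA_loop1, hg]
    rw [if_neg (h url hg)]

theorem pvA_loop1_hit (d : PySem.Dict String String) (k : String) (ks : List String) (url : String)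
    (hg : d.get? k = some url) (hcond : url ≠ "" ∧ PySem.Str.endswith (PySem.Str.lower url) ".zip" = false) :
    pvA_loop1 d (k :: ks) = some url := by
  simp only [pvA_loop1, hg, if_pos hcond]

-- rank of an entry whose key is the i-th preferred key and whose url passes the first loop's test
theorem pvB_rank_key (i : Nat) (hi : i < 3) (u : String)
    (hu : u ≠ "") (hz : PySem.Str.endswith (PySem.Str.lower u) ".zip" = false) :
    pvB_rank (pvB_preferred.getD i "") u = some i := by
  unfold pvB_rank
  rw [if_neg (pv_ne_true hz)]
  interval_cases i <;>
    · rw [if_pos ⟨hu, by decide⟩]; decide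

-- case 2: some entry has rank r' < 3; with distinct keys B selects the dict entry at the r'-th preferred key
theorem pvSel_case2 (l : List (String × String)) : ∀ (b r' : Nat) (k' u' : String),
    r' < b → r' < 3 →
    (∀ p ∈ l, ∀ r, pvB_rank p.1 p.2 = some r → r' ≤ r) →
    (∃ p ∈ l, pvB_rank p.1 p.2 = some r') →
    (l.map Prod.fst).Nodup →
    pvB_preferred[r']? = some k' →
    (PySem.Dict.mk l).get? k' = some u' →
    pvSel b l = some u' := by
  induction l with
  | nil => rintro b r' k' u' _ _ _ ⟨p, hp, _⟩ _ _ _; exact absurd hp (List.not_mem_nil)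
  | cons p l ih =>
    rintro b r' k' u' hb h3 hmin ⟨q, hq, hrq⟩ hnd hk' hget
    have hndtail : (l.map Prod.fst).Nodup := by simpa using hnd.of_cons
    have hmintail : ∀ p ∈ l, ∀ r, pvB_rank p.1 p.2 = some r → r' ≤ r :=
      fun q hq => hmin q (List.mem_cons_of_mem _ hq)
    by_cases hpk : p.1 = k'
    · -- head entry carries the preferred key: it is the witness
      have hrp : pvB_rank p.1 p.2 = some r' := by
        rcases List.mem_cons.1 hq with rfl | hql
        · exact hrq
        · exfalso
          have hq1 : q.1 = k' := by
            have := (pvB_rank_lt3 hrq h3).1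
            rw [hk'] at this; exact (Option.some_injective _ this).symm
          have : k' ∈ l.map Prod.fst := by
            exact List.mem_map.2 ⟨q, hql, hq1⟩
          simp only [List.map_cons, List.nodup_cons] at hnd
          exact hnd.1 (hpk ▸ this)
      have hu' : u' = p.2 := by
        obtain ⟨kp, vp⟩ := p
        simp only [PySem.Dict.get?_mk_cons] at hget
        rw [if_pos (by simpa using hpk)] at hget
        exact (Option.some_injective _ hget).symm
      simp only [pvSel, hrp, if_pos hb]
      have hsn : pvSel r' l = none := pvSel_none l r' fun q hq r hr => hmintail q hq r hr
      rw [hsn, hu']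
    · -- head entry's key differs from the preferred key
      have hqne : q ∈ l := by
        rcases List.mem_cons.1 hq with rfl | hql
        · exfalso
          have hq1 : q.1 = k' := by
            have := (pvB_rank_lt3 hrq h3).1
            rw [hk'] at this; exact (Option.some_injective _ this).symm
          exact hpk hq1
        · exact hql
      have hget' : (PySem.Dict.mk l).get? k' = some u' := by
        obtain ⟨kp, vp⟩ := p
        simp only [PySem.Dict.get?_mk_cons] at hget
        rw [if_neg (by simpa using hpk)] at hget
        exact hget
      cases hr : pvB_rank p.1 p.2 with
      | none =>
        simp only [pvSel, hr]
        exact ih b r' k' u' hb h3 hmintail ⟨q, hqne, hrq⟩ hndtail hk' hget'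
      | some r =>
        simp only [pvSel, hr]
        have hge : r' ≤ r := hmin p (List.mem_cons_self ..) r hr
        have hne : r ≠ r' := by
          intro hrr
          subst hrr
          have := (pvB_rank_lt3 hr h3).1
          rw [hk'] at this
          exact hpk (Option.some_injective _ this).symm
        by_cases hlt : r < b
        · rw [if_pos hlt]
          have : pvSel r l = some u' :=
            ih r r' k' u' (by omega) h3 hmintail ⟨q, hqne, hrq⟩ hndtail hk' hget'
          rw [this]
        · rw [if_neg hlt]
          exact ih b r' k' u' hb h3 hmintail ⟨q, hqne, hrq⟩ hndtail hk' hget'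

-- with distinct keys, the dict lookup at a witness's key returns the witness's url
theorem pv_get_of_witness (l : List (String × String)) (q : String × String)
    (hq : q ∈ l) (hnd : (l.map Prod.fst).Nodup) :
    (PySem.Dict.mk l).get? q.1 = some q.2 := by
  apply PySem.Dict.get?_of_mem_items
  · exact hq
  · simpa [PySem.Dict.keys] using hnd

-- no entry at preferred key i passes the first loop's test when every rank is ≥ r' > i
theorem pvA_loop1_skip_of_min (l : List (String × String)) (i : Nat) (hi : i < 3) (r' : Nat)
    (hir : i < r')
    (hmin : ∀ p ∈ l, ∀ r, pvB_rank p.1 p.2 = some r → r' ≤ r) :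
    ∀ url, (PySem.Dict.mk l).get? (pvB_preferred.getD i "") = some url →
      ¬(url ≠ "" ∧ PySem.Str.endswith (PySem.Str.lower url) ".zip" = false) := by
  intro url hg ⟨hu, hz⟩
  have hmem : (pvB_preferred.getD i "", url) ∈ l := by
    have := PySem.Dict.mem_items_of_get?_eq_some _ hg
    simpa using this
  have := hmin _ hmem i (pvB_rank_key i hi url hu hz)
  omega

-- ===== VERDICT (by name: the statement is the Claim_ definition above) =====
theorem pick_best_text_url_spec : Claim_equal_pick_best_text_url := by
  intro formats _ hpre
  unfold Spec_pick_best_text_url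
  unfold Pre_pick_best_text_url at hpre
  have hB : pick_best_text_url_alt formats
      = match pvSel 4 formats with | some v => some v | none => none := by
    unfold pick_best_text_url_alt
    exact pvSel_fold formats 4 none
  -- split on the minimal rank present in formats
  by_cases h0 : ∃ p ∈ formats, pvB_rank p.1 p.2 = some 0
  · obtain ⟨q, hq, hrq⟩ := h0
    have hmin : ∀ p ∈ formats, ∀ r, pvB_rank p.1 p.2 = some r → 0 ≤ r := fun _ _ _ _ => Nat.zero_le _
    obtain ⟨hk', hu, hz⟩ := pvB_rank_lt3 hrq (by omega)
    have hq1 : q.1 = pvB_preferred.getD 0 "" := by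
      simp [pvB_preferred] at hk' ⊢
      exact hk'.symm
    have hget : (PySem.Dict.mk formats).get? (pvB_preferred.getD 0 "") = some q.2 := by
      rw [← hq1]; exact pv_get_of_witness formats q hq hpre
    have hsel : pvSel 4 formats = some q.2 :=
      pvSel_case2 formats 4 0 (pvB_preferred.getD 0 "") q.2 (by omega) (by omega) hmin
        ⟨q, hq, hrq⟩ hpre (by decide) hget
    have hA1 : pvA_loop1 (PySem.Dict.mk formats) pvA_preferred_keys = some q.2 := by
      have : pvA_preferred_keys = pvB_preferred.getD 0 "" :: ["text/plain; charset=us-ascii", "text/plain"] := by decide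
      rw [this]
      exact pvA_loop1_hit _ _ _ q.2 hget ⟨hu, hz⟩
    unfold pick_best_text_url
    have hne : formats.isEmpty = false := by
      cases formats with
      | nil => exact absurd hq (List.not_mem_nil)
      | cons a l => rfl
    rw [hne, hB, hA1, hsel]
    rfl
  · by_cases h1 : ∃ p ∈ formats, pvB_rank p.1 p.2 = some 1
    · obtain ⟨q, hq, hrq⟩ := h1
      have hmin : ∀ p ∈ formats, ∀ r, pvB_rank p.1 p.2 = some r → 1 ≤ r := by
        intro p hp r hr
        rcases Nat.eq_zero_or_pos r with rfl | hpos
        · exact absurd ⟨p, hp, hr⟩ h0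
        · exact hpos
      obtain ⟨hk', hu, hz⟩ := pvB_rank_lt3 hrq (by omega)
      have hq1 : q.1 = pvB_preferred.getD 1 "" := by
        simp [pvB_preferred] at hk' ⊢
        exact hk'.symm
      have hget : (PySem.Dict.mk formats).get? (pvB_preferred.getD 1 "") = some q.2 := by
        rw [← hq1]; exact pv_get_of_witness formats q hq hpre
      have hsel : pvSel 4 formats = some q.2 :=
        pvSel_case2 formats 4 1 (pvB_preferred.getD 1 "") q.2 (by omega) (by omega) hmin
          ⟨q, hq, hrq⟩ hpre (by decide) hget
      have hA1 : pvA_loop1 (PySem.Dict.mk formats) pvA_preferred_keys = some q.2 := by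
        have h01 : pvA_preferred_keys
            = pvB_preferred.getD 0 "" :: pvB_preferred.getD 1 "" :: ["text/plain"] := by decide
        rw [h01]
        rw [pvA_loop1_skip _ _ _ (pvA_loop1_skip_of_min formats 0 (by omega) 1 (by omega) hmin)]
        exact pvA_loop1_hit _ _ _ q.2 hget ⟨hu, hz⟩
      unfold pick_best_text_url
      have hne : formats.isEmpty = false := by
        cases formats with
        | nil => exact absurd hq (List.not_mem_nil)
        | cons a l => rfl
      rw [hne, hB, hA1, hsel]
      rfl
    · by_cases h2 : ∃ p ∈ formats, pvB_rank p.1 p.2 = some 2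
      · obtain ⟨q, hq, hrq⟩ := h2
        have hmin : ∀ p ∈ formats, ∀ r, pvB_rank p.1 p.2 = some r → 2 ≤ r := by
          intro p hp r hr
          match r with
          | 0 => exact absurd ⟨p, hp, hr⟩ h0
          | 1 => exact absurd ⟨p, hp, hr⟩ h1
          | (n+2) => omega
        obtain ⟨hk', hu, hz⟩ := pvB_rank_lt3 hrq (by omega)
        have hq1 : q.1 = pvB_preferred.getD 2 "" := by
          simp [pvB_preferred] at hk' ⊢
          exact hk'.symm
        have hget : (PySem.Dict.mk formats).get? (pvB_preferred.getD 2 "") = some q.2 := by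
          rw [← hq1]; exact pv_get_of_witness formats q hq hpre
        have hsel : pvSel 4 formats = some q.2 :=
          pvSel_case2 formats 4 2 (pvB_preferred.getD 2 "") q.2 (by omega) (by omega) hmin
            ⟨q, hq, hrq⟩ hpre (by decide) hget
        have hA1 : pvA_loop1 (PySem.Dict.mk formats) pvA_preferred_keys = some q.2 := by
          have h02 : pvA_preferred_keys
              = pvB_preferred.getD 0 "" :: pvB_preferred.getD 1 "" :: pvB_preferred.getD 2 "" :: [] := by decide
          rw [h02]
          rw [pvA_loop1_skip _ _ _ (pvA_loop1_skip_of_min formats 0 (by omega) 2 (by omega) hmin)]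
          rw [pvA_loop1_skip _ _ _ (pvA_loop1_skip_of_min formats 1 (by omega) 2 (by omega) hmin)]
          exact pvA_loop1_hit _ _ _ q.2 hget ⟨hu, hz⟩
        unfold pick_best_text_url
        have hne : formats.isEmpty = false := by
          cases formats with
          | nil => exact absurd hq (List.not_mem_nil)
          | cons a l => rfl
        rw [hne, hB, hA1, hsel]
        rfl
      · -- case 1: every entry has rank ≥ 3 (or none)
        have hmin : ∀ p ∈ formats, ∀ r, pvB_rank p.1 p.2 = some r → 3 ≤ r := by
          intro p hp r hr
          match r with
          | 0 => exact absurd ⟨p, hp, hr⟩ h0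
          | 1 => exact absurd ⟨p, hp, hr⟩ h1
          | 2 => exact absurd ⟨p, hp, hr⟩ h2
          | (n+3) => omega
        have hsel : pvSel 4 formats = pvA_loop2 formats := pvSel_case1 formats hmin
        have hA1 : pvA_loop1 (PySem.Dict.mk formats) pvA_preferred_keys = none := by
          have h03 : pvA_preferred_keys
              = pvB_preferred.getD 0 "" :: pvB_preferred.getD 1 "" :: pvB_preferred.getD 2 "" :: [] := by decide
          rw [h03]
          rw [pvA_loop1_skip _ _ _ (pvA_loop1_skip_of_min formats 0 (by omega) 3 (by omega) hmin)]
          rw [pvA_loop1_skip _ _ _ (pvA_loop1_skip_of_min formats 1 (by omega) 3 (by omega) hmin)]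
          rw [pvA_loop1_skip _ _ _ (pvA_loop1_skip_of_min formats 2 (by omega) 3 (by omega) hmin)]
          rfl
        unfold pick_best_text_url
        cases formats with
        | nil => simp [hB, pvSel]
        | cons a l =>
          rw [show (a :: l).isEmpty = false from rfl, hB, hA1, hsel]
          cases pvA_loop2 (a :: l) <;> rfl
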